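-- pv_equiv track=rewrite | github.com/Wilailack/NLP_HW1_NER | data_utils.py | list_data
-- ===== SOURCE A (Python) =====
-- def list_data(data):
--     sentences = [s.strip().split("\n") for s in data.strip().split("\n\n")]
--     all_words, all_tags, sentence_words, sentence_tags = [], [], [], []
--
--     for sentence in sentences:
--         words, tags = [], []
--         for line in sentence:
--             if not line.strip():
--                 continue
--             word, tag = line.split("\t")
--             all_words.append(word)
--             all_tags.append(tag)
--             words.append(word)
--             tags.append(tag)
--         sentence_words.append(words)
--         sentence_tags.append(tags)
--
--     return all_words, all_tags, sentence_words, sentence_tags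
-- ===== SOURCE B (Python) =====
-- def list_data(data):
--     # Recursive, back-to-front decomposition: each sentence is parsed by structural
--     # recursion into a (words, tags) pair, and the four outputs are assembled by
--     # consing/concatenating these pairs while unwinding — no mutable accumulators.
--     def parse(lines):
--         if not lines:
--             return [], []
--         ws, ts = parse(lines[1:])
--         line = lines[0]
--         if not line.strip():
--             return ws, ts
--         w, t = line.split("\t")
--         return [w] + ws, [t] + ts
--
--     def go(sents):
--         if not sents:
--             return [], [], [], []
--         ws, ts = parse(sents[0].strip().split("\n"))
--         aw, at_, sw, st = go(sents[1:])
--         return ws + aw, ts + at_, [ws] + sw, [ts] + st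
--
--     return go(data.strip().split("\n\n"))
-- ===== Notes on version B (the rewrite author's own statement) =====
-- stated objective: alternative
-- what changed: Replaces A's iterative fused loop with four mutable accumulators by structural recursion: each sentence is parsed recursively back-to-front into a (words, tags) pair, and the four outputs are assembled by cons/concat while unwinding, the flat lists being derived from the per-sentence pairs.
import Mathlib
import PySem

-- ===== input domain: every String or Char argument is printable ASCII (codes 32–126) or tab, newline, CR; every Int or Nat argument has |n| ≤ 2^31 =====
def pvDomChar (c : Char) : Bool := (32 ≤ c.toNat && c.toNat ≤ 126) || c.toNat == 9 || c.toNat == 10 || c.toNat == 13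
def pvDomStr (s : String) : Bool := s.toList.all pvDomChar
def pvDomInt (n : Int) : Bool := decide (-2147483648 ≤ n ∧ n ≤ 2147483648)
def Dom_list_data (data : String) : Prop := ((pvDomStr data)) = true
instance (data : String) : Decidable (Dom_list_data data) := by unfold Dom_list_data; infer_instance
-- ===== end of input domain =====

-- B replaces A's fused forward loop with four accumulators by structural recursion:
-- each sentence is parsed back-to-front into a (words, tags) pair and the four outputs
-- are assembled by cons/concat while unwinding (objective: alternative decomposition).

-- ===== PORT A =====

-- s.split(sep) for a nonempty literal sep (split? is none only for sep = "")
def pvSplit (s sep : String) : List String := (PySem.Str.split? s sep).getD []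

-- the sentence list A builds: [s.strip().split("\n") for s in data.strip().split("\n\n")]
def pvSentences (data : String) : List (List String) :=
  (pvSplit (PySem.Str.strip data) "\n\n").map (fun s => pvSplit (PySem.Str.strip s) "\n")

-- A's inner loop body over (all_words, all_tags, words, tags); the non-2-element split
-- (Python: ValueError on unpacking) leaves the state unchanged — excluded by Pre_
def pvStepA (p : List String × List String × List String × List String) (line : String) :
    List String × List String × List String × List String :=
  if PySem.Str.strip line = "" then p
  else match PySem.Str.split? line "\t" with
    | some [w, t] => (p.1 ++ [w], p.2.1 ++ [t], p.2.2.1 ++ [w], p.2.2.2 ++ [t])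
    | _ => p

def list_data (data : String) : List String × List String × List (List String) × List (List String) :=
  (pvSentences data).foldl
    (fun acc sentence =>
      let inner := sentence.foldl pvStepA (acc.1, acc.2.1, [], [])
      (inner.1, inner.2.1, acc.2.2.1 ++ [inner.2.2.1], acc.2.2.2 ++ [inner.2.2.2]))
    ([], [], [], [])

-- ===== PORT B =====

-- B's recursive 'parse': the lines of one sentence → (words, tags), back-to-front;
-- the non-2-element split (Python: ValueError on unpacking) is excluded by Pre_
def pvParse : List String → List String × List String
  | [] => ([], [])
  | line :: rest =>
    let (ws, ts) := pvParse rest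
    if PySem.Str.strip line = "" then (ws, ts)
    else match PySem.Str.split? line "\t" with
      | some [w, t] => (w :: ws, t :: ts)
      | _ => (ws, ts)

-- B's recursive 'go' over the raw sentence strings
def pvGo : List String → List String × List String × List (List String) × List (List String)
  | [] => ([], [], [], [])
  | s :: rest =>
    let (ws, ts) := pvParse (pvSplit (PySem.Str.strip s) "\n")
    let (aw, at_, sw, st) := pvGo rest
    (ws ++ aw, ts ++ at_, ws :: sw, ts :: st)

def list_data_alt (data : String) : List String × List String × List (List String) × List (List String) :=
  pvGo (pvSplit (PySem.Str.strip data) "\n\n")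

-- ===== PRECONDITION & SPEC =====
-- Pre_ excludes exactly the inputs where some non-blank line does not split into two
-- tab-separated fields: there both Pythons raise ValueError on unpacking.
def Pre_list_data (data : String) : Prop :=
  ∀ sentence ∈ pvSentences data, ∀ line ∈ sentence,
    PySem.Str.strip line = "" ∨ ((PySem.Str.split? line "\t").getD []).length = 2
instance (data : String) : Decidable (Pre_list_data data) := by unfold Pre_list_data; infer_instance

def pvWitness_list_data : String := "a\tb\nc\td\n\ne\tf"

def Spec_list_data (data : String) (out : List String × List String × List (List String) × List (List String)) : Prop := out = list_data_alt data
instance (data : String) (out : List String × List String × List (List String) × List (List String)) : Decidable (Spec_list_data data out) := by unfold Spec_list_data; infer_instance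

-- ===== CLAIM (what is proved, stated in full; the proofs are below) =====
def Claim_equal_list_data : Prop := ∀ (data : String), Dom_list_data data → Pre_list_data data → Spec_list_data data (list_data data)

-- ===== LEMMAS AND PROOFS =====

lemma inner_foldl (sentence : List String)
    (h : ∀ line ∈ sentence, PySem.Str.strip line = "" ∨ ((PySem.Str.split? line "\t").getD []).length = 2)
    (aw at_ ws ts : List String) :
    sentence.foldl pvStepA (aw, at_, ws, ts) =
      (aw ++ (pvParse sentence).1, at_ ++ (pvParse sentence).2,
       ws ++ (pvParse sentence).1, ts ++ (pvParse sentence).2) := by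
  induction sentence generalizing aw at_ ws ts with
  | nil => simp [pvParse]
  | cons line rest ih =>
    have hl := h line (by simp)
    have hrest : ∀ l ∈ rest, PySem.Str.strip l = "" ∨ ((PySem.Str.split? l "\t").getD []).length = 2 :=
      fun l hm => h l (by simp [hm])
    by_cases hb : PySem.Str.strip line = ""
    · simp [List.foldl_cons, pvStepA, hb, ih hrest, pvParse]
    · rcases hl with hl | hl
      · exact absurd hl hb
      · obtain ⟨w, t, hwt⟩ : ∃ w t, PySem.Str.split? line "\t" = some [w, t] := by
          cases hsp : PySem.Str.split? line "\t" with
          | none => simp [hsp] at hl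
          | some l =>
            match l with
            | [w, t] => exact ⟨w, t, rfl⟩
            | [] => simp [hsp] at hl
            | [x] => simp [hsp] at hl
            | x :: y :: z :: r => simp [hsp] at hl
        simp [List.foldl_cons, pvStepA, hb, hwt, ih hrest, pvParse]

lemma outer_foldl (raw : List String)
    (h : ∀ s ∈ raw, ∀ line ∈ pvSplit (PySem.Str.strip s) "\n",
      PySem.Str.strip line = "" ∨ ((PySem.Str.split? line "\t").getD []).length = 2)
    (aw at_ : List String) (sw st : List (List String)) :
    (raw.map (fun s => pvSplit (PySem.Str.strip s) "\n")).foldl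
      (fun acc sentence =>
        let inner := sentence.foldl pvStepA (acc.1, acc.2.1, [], [])
        (inner.1, inner.2.1, acc.2.2.1 ++ [inner.2.2.1], acc.2.2.2 ++ [inner.2.2.2]))
      (aw, at_, sw, st) =
      (aw ++ (pvGo raw).1, at_ ++ (pvGo raw).2.1,
       sw ++ (pvGo raw).2.2.1, st ++ (pvGo raw).2.2.2) := by
  induction raw generalizing aw at_ sw st with
  | nil => simp [pvGo]
  | cons s rest ih =>
    have hs := h s (by simp)
    have hrest : ∀ s' ∈ rest, ∀ line ∈ pvSplit (PySem.Str.strip s') "\n",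
        PySem.Str.strip line = "" ∨ ((PySem.Str.split? line "\t").getD []).length = 2 :=
      fun s' hm => h s' (by simp [hm])
    simp only [List.map_cons, List.foldl_cons, inner_foldl _ hs, ih hrest, pvGo]
    simp [List.append_assoc]

-- ===== VERDICT (by name: the statement is the Claim_ definition above) =====
theorem list_data_spec : Claim_equal_list_data := by
  intro data _ hpre
  unfold Spec_list_data list_data list_data_alt
  have h : ∀ s ∈ pvSplit (PySem.Str.strip data) "\n\n",
      ∀ line ∈ pvSplit (PySem.Str.strip s) "\n",
      PySem.Str.strip line = "" ∨ ((PySem.Str.split? line "\t").getD []).length = 2 := by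
    intro s hs line hline
    exact hpre _ (by simpa [pvSentences] using List.mem_map_of_mem hs) line hline
  rw [pvSentences, outer_foldl _ h]
  simp
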